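-- pv_equiv track=rewrite | github.com/Achikam-Levy/intro2cs | ex10/game.py | radius_bomb
-- ===== SOURCE A (Python) =====
-- def radius_bomb(radius, coordinates):
--     """
--     :param radius: the correct radius of the bomb.
--     :param coordinates: the coordinates of the center of the bomb.
--     :return: all the relevant coordinates that feel the explosion.
--     """
--     y, x = coordinates[0], coordinates[1]
--     bomb_coord = set()
--     index = radius
--     if radius == 0:
--         bomb_coord.add(coordinates)
--         return bomb_coord
--     else:
--         for i in range(radius + 1):
--             for j in range(index + 1):
--                 if (abs(x - x + i) + abs(x - x + j)) == radius:
--                     bomb_coord.add((y + i, x + j))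
--                 if (abs(x - x + i) + abs(x - x - j)) == radius:
--                     bomb_coord.add((y + i, x - j))
--             index -= 1
--         index = radius
--         for i in range(radius + 1):
--             for j in range(index + 1):
--                 if (abs(y - y - i) + abs(x - x + j)) == radius:
--                     bomb_coord.add((y - i, x + j))
--                 if (abs(y - y - i) + abs(x - x - j)) == radius:
--                     bomb_coord.add((y - i, x - j))
--             index -= 1
--     return bomb_coord
-- ===== SOURCE B (Python) =====
-- def radius_bomb(radius, coordinates):
--     """O(radius) direct enumeration of the diamond perimeter; no nested scans, no dedup."""
--     y, x = coordinates[0], coordinates[1]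
--     if radius == 0:
--         return {(y, x)}
--     pts = []
--     for i in range(radius + 1):
--         pts.append((y + i, x + radius - i))
--         if radius - i > 0:
--             pts.append((y + i, x - (radius - i)))
--     for i in range(1, radius + 1):
--         pts.append((y - i, x + radius - i))
--         if radius - i > 0:
--             pts.append((y - i, x - (radius - i)))
--     return set(pts)
-- ===== Notes on version B (the rewrite author's own statement) =====
-- stated objective: faster
-- what changed: A scans two (radius+1)-triangles of (i,j) pairs testing |i|+|j|==radius and deduplicates through a set; B enumerates the diamond perimeter directly with j = radius-i in a single O(radius) pass, building the points distinct by construction.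
-- intended difference: On radius == 0 with more than two coordinates A returns the whole coordinates tuple as the single blast point; B returns just the centre (y, x), the degenerate radius-0 diamond, which is the intended value. — e.g. on radius_bomb(0, [1, 2, 3]): A returns [[1, 2, 3]], B returns [[1, 2]]
import Mathlib
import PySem

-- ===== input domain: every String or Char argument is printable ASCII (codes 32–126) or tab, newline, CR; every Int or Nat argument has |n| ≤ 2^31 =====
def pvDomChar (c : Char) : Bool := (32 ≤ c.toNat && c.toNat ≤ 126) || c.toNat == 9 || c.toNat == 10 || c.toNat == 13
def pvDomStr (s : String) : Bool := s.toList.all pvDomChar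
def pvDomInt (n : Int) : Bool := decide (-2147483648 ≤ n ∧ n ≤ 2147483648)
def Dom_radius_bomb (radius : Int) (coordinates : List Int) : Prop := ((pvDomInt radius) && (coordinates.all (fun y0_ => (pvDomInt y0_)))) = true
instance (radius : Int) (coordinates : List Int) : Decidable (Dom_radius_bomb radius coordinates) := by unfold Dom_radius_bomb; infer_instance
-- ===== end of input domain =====

-- B replaces A's two quadratic scans (testing |i|+|j| == radius over a triangle, deduplicated
-- through a set) by a direct O(radius) enumeration of the diamond perimeter: j = radius - i.

-- ===== PORT A =====
-- literal transliteration of A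
-- inner j-loop of A's first nested scan (conditions written exactly as in the Python)
def aInner1 (radius y x i : Int) (s : PySem.Set (List Int)) (idx : Int) : PySem.Set (List Int) :=
  (PySem.List.pyRange 0 (idx + 1) 1).foldl
    (fun (s : PySem.Set (List Int)) j =>
      let s := if |x - x + i| + |x - x + j| = radius then PySem.Set.add s [y + i, x + j] else s
      if |x - x + i| + |x - x - j| = radius then PySem.Set.add s [y + i, x - j] else s) s

def aStep1 (radius y x : Int) (st : PySem.Set (List Int) × Int) (i : Int) : PySem.Set (List Int) × Int :=
  (aInner1 radius y x i st.1 st.2, st.2 - 1)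

-- inner j-loop of A's second nested scan
def aInner2 (radius y x i : Int) (s : PySem.Set (List Int)) (idx : Int) : PySem.Set (List Int) :=
  (PySem.List.pyRange 0 (idx + 1) 1).foldl
    (fun (s : PySem.Set (List Int)) j =>
      let s := if |y - y - i| + |x - x + j| = radius then PySem.Set.add s [y - i, x + j] else s
      if |y - y - i| + |x - x - j| = radius then PySem.Set.add s [y - i, x - j] else s) s

def aStep2 (radius y x : Int) (st : PySem.Set (List Int) × Int) (i : Int) : PySem.Set (List Int) × Int :=
  (aInner2 radius y x i st.1 st.2, st.2 - 1)

def radius_bomb (radius : Int) (coordinates : List Int) : List (List Int) :=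
  match PySem.List.pyGet? coordinates 0, PySem.List.pyGet? coordinates 1 with
  | some y, some x =>
    if radius = 0 then [coordinates]  -- Python: bomb_coord.add(coordinates) — the whole tuple
    else
      let st1 := (PySem.List.pyRange 0 (radius + 1) 1).foldl (aStep1 radius y x) (PySem.Set.empty, radius)
      let st2 := (PySem.List.pyRange 0 (radius + 1) 1).foldl (aStep2 radius y x) (st1.1, radius)
      st2.1
  | _, _ => []

-- ===== PORT B =====
def bStep1 (radius y x : Int) (acc : List (List Int)) (i : Int) : List (List Int) :=
  let acc := acc ++ [[y + i, x + radius - i]]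
  if radius - i > 0 then acc ++ [[y + i, x - (radius - i)]] else acc

def bStep2 (radius y x : Int) (acc : List (List Int)) (i : Int) : List (List Int) :=
  let acc := acc ++ [[y - i, x + radius - i]]
  if radius - i > 0 then acc ++ [[y - i, x - (radius - i)]] else acc

def radius_bomb_alt (radius : Int) (coordinates : List Int) : List (List Int) :=
  match PySem.List.pyGet? coordinates 0 with
  | none => []
  | some y =>
  match PySem.List.pyGet? coordinates 1 with
  | none => []
  | some x =>
    if radius = 0 then [[y, x]]
    else
      let pts1 := (PySem.List.pyRange 0 (radius + 1) 1).foldl (bStep1 radius y x) []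
      let pts := (PySem.List.pyRange 1 (radius + 1) 1).foldl (bStep2 radius y x) pts1
      PySem.Set.ofList pts

-- ===== PRECONDITION & SPEC =====
-- Pre_ excludes only the inputs where the Python A raises: coordinates with fewer
-- than two entries (IndexError on coordinates[0] / coordinates[1]).
def Pre_radius_bomb (radius : Int) (coordinates : List Int) : Prop :=
  2 ≤ coordinates.length
instance (radius : Int) (coordinates : List Int) : Decidable (Pre_radius_bomb radius coordinates) := by
  unfold Pre_radius_bomb; infer_instance
def pvWitness_radius_bomb : Int × List Int := (2, [5, -3])

-- On radius == 0 with more than two coordinates A returns the whole coordinates tuple as the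
-- single blast point; B returns just the centre (y, x) — the degenerate radius-0 diamond,
-- which is the intended value.
def D_radius_bomb (radius : Int) (coordinates : List Int) : Prop :=
  radius = 0 ∧ coordinates.length ≠ 2
instance (radius : Int) (coordinates : List Int) : Decidable (D_radius_bomb radius coordinates) := by
  unfold D_radius_bomb; infer_instance

def Spec_radius_bomb (radius : Int) (coordinates : List Int) (out : List (List Int)) : Prop := ¬ D_radius_bomb radius coordinates → out = radius_bomb_alt radius coordinates
instance (radius : Int) (coordinates : List Int) (out : List (List Int)) : Decidable (Spec_radius_bomb radius coordinates out) := by unfold Spec_radius_bomb; infer_instance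

def pvDiffWitness_radius_bomb : Int × List Int := (0, [1, 2, 3])
def pvDiffWitnessOut_radius_bomb : (List (List Int)) × (List (List Int)) := ([[1, 2, 3]], [[1, 2]])

-- ===== CLAIM (what is proved, stated in full; the proofs are below) =====
def Claim_unchanged_radius_bomb : Prop := ∀ (radius : Int) (coordinates : List Int), Dom_radius_bomb radius coordinates → Pre_radius_bomb radius coordinates → Spec_radius_bomb radius coordinates (radius_bomb radius coordinates)
def Claim_changed_radius_bomb : Prop := Dom_radius_bomb (pvDiffWitness_radius_bomb.1) (pvDiffWitness_radius_bomb.2) ∧ Pre_radius_bomb (pvDiffWitness_radius_bomb.1) (pvDiffWitness_radius_bomb.2) ∧ D_radius_bomb (pvDiffWitness_radius_bomb.1) (pvDiffWitness_radius_bomb.2) ∧ radius_bomb (pvDiffWitness_radius_bomb.1) (pvDiffWitness_radius_bomb.2) = pvDiffWitnessOut_radius_bomb.1 ∧ radius_bomb_alt (pvDiffWitness_radius_bomb.1) (pvDiffWitness_radius_bomb.2) = pvDiffWitnessOut_radius_bomb.2 ∧ pvDiffWitnessOut_radius_bomb.1 ≠ pvDiffWitnessOut_radius_bomb.2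
def Claim_exact_radius_bomb : Prop := ∀ (radius : Int) (coordinates : List Int), Dom_radius_bomb radius coordinates → Pre_radius_bomb radius coordinates → D_radius_bomb radius coordinates → radius_bomb radius coordinates ≠ radius_bomb_alt radius coordinates

-- ===== LEMMAS AND PROOFS =====

-- the perimeter lists both sides build, indexed by how many outer iterations have run
def seg1 (y x r : Int) : Nat → List (List Int)
  | 0 => []
  | m + 1 => seg1 y x r m ++
      (if r - (m : Int) = 0 then [[y + m, x + (r - m)]]
       else [[y + m, x + (r - m)], [y + m, x - (r - m)]])

def seg2 (y x r : Int) : Nat → List (List Int)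
  | 0 => []
  | m + 1 => seg2 y x r m ++
      (if r - ((m : Int) + 1) = 0 then [[y - ((m : Int) + 1), x + (r - ((m : Int) + 1))]]
       else [[y - ((m : Int) + 1), x + (r - ((m : Int) + 1))], [y - ((m : Int) + 1), x - (r - ((m : Int) + 1))]])

theorem foldl_id {A B : Type} {l : List B} {f : A → B → A} {s : A}
    (h : ∀ s x, x ∈ l → f s x = s) : l.foldl f s = s := by
  induction l generalizing s with
  | nil => rfl
  | cons a t ih =>
    rw [List.foldl_cons, h s a (by simp)]
    exact ih fun s x hx => h s x (by simp [hx])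

theorem mem_seg1 {y x r : Int} {m : Nat} {p : List Int} (hp : p ∈ seg1 y x r m) :
    ∃ i : Nat, i < m ∧ (p = [y + i, x + (r - i)] ∨ p = [y + i, x - (r - i)]) := by
  induction m with
  | zero => simp [seg1] at hp
  | succ m ih =>
    rw [seg1] at hp
    rcases List.mem_append.1 hp with h | h
    · obtain ⟨i, hi, h2⟩ := ih h
      exact ⟨i, Nat.lt_succ_of_lt hi, h2⟩
    · refine ⟨m, Nat.lt_succ_self m, ?_⟩
      split_ifs at h with h0 <;> simp only [List.mem_cons, List.mem_singleton] at h <;> tauto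

theorem mem_seg2 {y x r : Int} {m : Nat} {p : List Int} (hp : p ∈ seg2 y x r m) :
    ∃ i : Nat, 1 ≤ i ∧ i ≤ m ∧ (p = [y - i, x + (r - i)] ∨ p = [y - i, x - (r - i)]) := by
  induction m with
  | zero => simp [seg2] at hp
  | succ m ih =>
    rw [seg2] at hp
    rcases List.mem_append.1 hp with h | h
    · obtain ⟨i, h1, h2, h3⟩ := ih h
      exact ⟨i, h1, Nat.le_succ_of_le h2, h3⟩
    · refine ⟨m + 1, by omega, le_refl _, ?_⟩
      have e : ((m + 1 : Nat) : Int) = (m : Int) + 1 := by push_cast; ring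
      rw [e]
      split_ifs at h with h0 <;> simp only [List.mem_cons, List.mem_singleton] at h <;> tauto

-- seed elements of seg1 that A's second loop re-adds at i = 0
theorem mem_seg1_zero {y x r : Int} {m : Nat} (hm : 0 < m) (hr : r ≠ 0) :
    [y, x + r] ∈ seg1 y x r m ∧ [y, x - r] ∈ seg1 y x r m := by
  induction m with
  | zero => omega
  | succ m ih =>
    rcases Nat.eq_zero_or_pos m with rfl | hm'
    · simp [seg1, hr]
    · obtain ⟨h1, h2⟩ := ih hm'
      rw [seg1]
      exact ⟨List.mem_append_left _ h1, List.mem_append_left _ h2⟩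

-- A's inner j-loop only fires at j = radius - i, adding the two mirror points
theorem aInner1_eq (r y x i : Int) (hi : 0 ≤ i) (k : Int) (hk0 : 0 ≤ k) (hk : i + k = r)
    (s : PySem.Set (List Int)) :
    aInner1 r y x i s k =
      PySem.Set.add (PySem.Set.add s [y + i, x + k]) [y + i, x - k] := by
  unfold aInner1
  rw [PySem.List.pyRange_one_succ_right hk0, List.foldl_append]
  have hpre : (PySem.List.pyRange 0 k 1).foldl
      (fun (s : PySem.Set (List Int)) j =>
        let s := if |x - x + i| + |x - x + j| = r then PySem.Set.add s [y + i, x + j] else s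
        if |x - x + i| + |x - x - j| = r then PySem.Set.add s [y + i, x - j] else s) s = s := by
    apply foldl_id
    intro s j hj
    rw [PySem.List.mem_pyRange_one] at hj
    have e1 : x - x + i = i := by ring
    have e2 : x - x + j = j := by ring
    have e3 : x - x - j = -j := by ring
    simp only [e1, e2, e3, abs_neg, abs_of_nonneg hi, abs_of_nonneg hj.1]
    rw [if_neg (by omega), if_neg (by omega)]
  rw [hpre]
  have e1 : x - x + i = i := by ring
  have e2 : x - x + k = k := by ring
  have e3 : x - x - k = -k := by ring
  simp only [List.foldl_cons, List.foldl_nil, e1, e2, e3, abs_neg,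
    abs_of_nonneg hi, abs_of_nonneg hk0]
  rw [if_pos hk, if_pos hk]

theorem aInner2_eq (r y x i : Int) (hi : 0 ≤ i) (k : Int) (hk0 : 0 ≤ k) (hk : i + k = r)
    (s : PySem.Set (List Int)) :
    aInner2 r y x i s k =
      PySem.Set.add (PySem.Set.add s [y - i, x + k]) [y - i, x - k] := by
  unfold aInner2
  rw [PySem.List.pyRange_one_succ_right hk0, List.foldl_append]
  have hpre : (PySem.List.pyRange 0 k 1).foldl
      (fun (s : PySem.Set (List Int)) j =>
        let s := if |y - y - i| + |x - x + j| = r then PySem.Set.add s [y - i, x + j] else s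
        if |y - y - i| + |x - x - j| = r then PySem.Set.add s [y - i, x - j] else s) s = s := by
    apply foldl_id
    intro s j hj
    rw [PySem.List.mem_pyRange_one] at hj
    have e1 : y - y - i = -i := by ring
    have e2 : x - x + j = j := by ring
    have e3 : x - x - j = -j := by ring
    simp only [e1, e2, e3, abs_neg, abs_of_nonneg hi, abs_of_nonneg hj.1]
    rw [if_neg (by omega), if_neg (by omega)]
  rw [hpre]
  have e1 : y - y - i = -i := by ring
  have e2 : x - x + k = k := by ring
  have e3 : x - x - k = -k := by ring
  simp only [List.foldl_cons, List.foldl_nil, e1, e2, e3, abs_neg,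
    abs_of_nonneg hi, abs_of_nonneg hk0]
  rw [if_pos hk, if_pos hk]

-- A's first outer loop builds exactly seg1, with the index register tracking r - m
theorem aLoop1_eq (y x r : Int) (hr : 0 < r) (m : Nat) (hm : (m : Int) ≤ r + 1) :
    (PySem.List.pyRange 0 (m : Int) 1).foldl (aStep1 r y x) (PySem.Set.empty, r) =
      (seg1 y x r m, r - m) := by
  induction m with
  | zero => simp [PySem.List.pyRange_one_eq_nil, seg1]
  | succ m ih =>
    have hm' : (m : Int) ≤ r := by push_cast at hm ⊢; omega
    rw [show ((m + 1 : Nat) : Int) = (m : Int) + 1 by push_cast; ring,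
      PySem.List.pyRange_one_succ_right (by positivity), List.foldl_append,
      ih (by omega), List.foldl_cons, List.foldl_nil]
    unfold aStep1
    simp only []
    rw [aInner1_eq r y x (m : Int) (by positivity) (r - (m : Int)) (by omega) (by ring)]
    have hfresh1 : [y + (m : Int), x + (r - (m : Int))] ∉ seg1 y x r m := by
      intro h
      obtain ⟨i, hi, h2⟩ := mem_seg1 h
      rcases h2 with h2 | h2 <;> simp at h2 <;> omega
    rw [PySem.Set.add_of_not_mem hfresh1]
    simp only [Prod.mk.injEq]
    refine ⟨?_, by omega⟩
    by_cases h0 : r - (m : Int) = 0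
    · have e : x - (r - (m : Int)) = x + (r - (m : Int)) := by omega
      rw [e, PySem.Set.add_of_mem (by simp), seg1, if_pos h0]
    · have hfresh2 : [y + (m : Int), x - (r - (m : Int))] ∉
          seg1 y x r m ++ [[y + (m : Int), x + (r - (m : Int))]] := by
        intro h
        rcases List.mem_append.1 h with h | h
        · obtain ⟨i, hi, h2⟩ := mem_seg1 h
          rcases h2 with h2 | h2 <;> simp at h2 <;> omega
        · simp at h; omega
      rw [PySem.Set.add_of_not_mem hfresh2, seg1, if_neg h0]
      simp

-- B's first loop builds the same list directly
theorem bLoop1_eq (y x r : Int) (hr : 0 < r) (m : Nat) (hm : (m : Int) ≤ r + 1) :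
    (PySem.List.pyRange 0 (m : Int) 1).foldl (bStep1 r y x) [] = seg1 y x r m := by
  induction m with
  | zero => simp [PySem.List.pyRange_one_eq_nil, seg1]
  | succ m ih =>
    have hm' : (m : Int) ≤ r := by push_cast at hm ⊢; omega
    rw [show ((m + 1 : Nat) : Int) = (m : Int) + 1 by push_cast; ring,
      PySem.List.pyRange_one_succ_right (by positivity), List.foldl_append,
      ih (by omega), List.foldl_cons, List.foldl_nil]
    unfold bStep1
    simp only []
    have e : x + r - (m : Int) = x + (r - (m : Int)) := by ring
    by_cases h0 : r - (m : Int) = 0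
    · rw [if_neg (by omega), seg1, if_pos h0, e]
    · rw [if_pos (by omega), seg1, if_neg h0, e]
      simp

-- A's second outer loop: i = 0 re-adds points already present, i ≥ 1 appends seg2
theorem aLoop2_eq (y x r : Int) (hr : 0 < r) (S : PySem.Set (List Int))
    (hS0 : [y, x + r] ∈ S ∧ [y, x - r] ∈ S)
    (hS : ∀ p ∈ S, ∃ i : Nat, p = [y + i, x + (r - i)] ∨ p = [y + i, x - (r - i)])
    (m : Nat) (hm : (m : Int) ≤ r) :
    (PySem.List.pyRange 0 ((m : Int) + 1) 1).foldl (aStep2 r y x) (S, r) =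
      (S ++ seg2 y x r m, r - m - 1) := by
  induction m with
  | zero =>
    rw [show ((0 : Nat) : Int) + 1 = 0 + 1 by ring, PySem.List.pyRange_one_singleton,
      List.foldl_cons, List.foldl_nil]
    unfold aStep2
    simp only []
    rw [aInner2_eq r y x 0 le_rfl r (by omega) (by ring)]
    have e1 : y - 0 = y := by ring
    rw [e1, PySem.Set.add_of_mem hS0.1, PySem.Set.add_of_mem hS0.2]
    simp [seg2]
  | succ m ih =>
    have hm' : (m : Int) ≤ r := by push_cast at hm ⊢; omega
    rw [show ((m + 1 : Nat) : Int) + 1 = ((m : Int) + 1) + 1 by push_cast; ring,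
      PySem.List.pyRange_one_succ_right (by omega), List.foldl_append,
      ih (by omega), List.foldl_cons, List.foldl_nil]
    unfold aStep2
    simp only []
    rw [aInner2_eq r y x ((m : Int) + 1) (by positivity) (r - (m : Int) - 1) (by omega) (by ring)]
    have hfresh1 : [y - ((m : Int) + 1), x + (r - (m : Int) - 1)] ∉ S ++ seg2 y x r m := by
      intro h
      rcases List.mem_append.1 h with h | h
      · obtain ⟨i, h2⟩ := hS _ h
        rcases h2 with h2 | h2 <;> simp at h2 <;> omega
      · obtain ⟨i, hi1, hi2, h2⟩ := mem_seg2 h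
        rcases h2 with h2 | h2 <;> simp at h2 <;> omega
    rw [PySem.Set.add_of_not_mem hfresh1]
    simp only [Prod.mk.injEq]
    refine ⟨?_, by omega⟩
    have e : r - ((m : Int) + 1) = r - (m : Int) - 1 := by ring
    by_cases h0 : r - (m : Int) - 1 = 0
    · have e2 : x - (r - (m : Int) - 1) = x + (r - (m : Int) - 1) := by omega
      rw [e2, PySem.Set.add_of_mem (by simp), seg2, if_pos (by omega), e]
      simp
    · have hfresh2 : [y - ((m : Int) + 1), x - (r - (m : Int) - 1)] ∉
          (S ++ seg2 y x r m) ++ [[y - ((m : Int) + 1), x + (r - (m : Int) - 1)]] := by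
        intro h
        rcases List.mem_append.1 h with h | h
        · rcases List.mem_append.1 h with h | h
          · obtain ⟨i, h2⟩ := hS _ h
            rcases h2 with h2 | h2 <;> simp at h2 <;> omega
          · obtain ⟨i, hi1, hi2, h2⟩ := mem_seg2 h
            rcases h2 with h2 | h2 <;> simp at h2 <;> omega
        · simp at h; omega
      rw [PySem.Set.add_of_not_mem hfresh2, seg2, if_neg (by omega), e]
      simp

-- B's second loop appends the same seg2
theorem bLoop2_eq (y x r : Int) (hr : 0 < r) (P : List (List Int)) (m : Nat) (hm : (m : Int) ≤ r) :
    (PySem.List.pyRange 1 ((m : Int) + 1) 1).foldl (bStep2 r y x) P = P ++ seg2 y x r m := by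
  induction m with
  | zero => simp [PySem.List.pyRange_one_eq_nil, seg2]
  | succ m ih =>
    have hm' : (m : Int) ≤ r := by push_cast at hm ⊢; omega
    rw [show ((m + 1 : Nat) : Int) + 1 = ((m : Int) + 1) + 1 by push_cast; ring,
      PySem.List.pyRange_one_succ_right (by omega), List.foldl_append,
      ih (by omega), List.foldl_cons, List.foldl_nil]
    unfold bStep2
    simp only []
    have e : x + r - ((m : Int) + 1) = x + (r - ((m : Int) + 1)) := by ring
    by_cases h0 : r - ((m : Int) + 1) = 0
    · rw [if_neg (by omega), seg2, if_pos h0, e]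
      simp
    · rw [if_pos (by omega), seg2, if_neg h0, e]
      simp

-- the full perimeter list is duplicate-free, so Set.ofList leaves it unchanged
theorem nodup_seg1 (y x r : Int) (m : Nat) : (seg1 y x r m).Nodup := by
  induction m with
  | zero => simp [seg1]
  | succ m ih =>
    rw [seg1]
    apply List.Nodup.append ih
    · split_ifs with h0 <;> simp <;> omega
    · intro p hp hq
      obtain ⟨i, hi, h2⟩ := mem_seg1 hp
      split_ifs at hq with h0 <;> simp only [List.mem_cons, List.mem_singleton] at hq <;>
        rcases h2 with h2 | h2 <;> rw [h2] at hq <;>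
        first
        | (simp at hq; omega)
        | (rcases hq with hq | hq <;> simp at hq <;> omega)

theorem nodup_seg2 (y x r : Int) (m : Nat) : (seg2 y x r m).Nodup := by
  induction m with
  | zero => simp [seg2]
  | succ m ih =>
    rw [seg2]
    apply List.Nodup.append ih
    · split_ifs with h0 <;> simp <;> omega
    · intro p hp hq
      obtain ⟨i, hi1, hi2, h2⟩ := mem_seg2 hp
      split_ifs at hq with h0 <;> simp only [List.mem_cons, List.mem_singleton] at hq <;>
        rcases h2 with h2 | h2 <;> rw [h2] at hq <;>
        first
        | (simp at hq; omega)
        | (rcases hq with hq | hq <;> simp at hq <;> omega)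

theorem nodup_perimeter (y x r : Int) (m1 m2 : Nat) :
    (seg1 y x r m1 ++ seg2 y x r m2).Nodup := by
  apply List.Nodup.append (nodup_seg1 y x r m1) (nodup_seg2 y x r m2)
  intro p hp hq
  obtain ⟨i, hi, h2⟩ := mem_seg1 hp
  obtain ⟨j, hj1, hj2, h3⟩ := mem_seg2 hq
  rcases h2 with h2 | h2 <;> rcases h3 with h3 | h3 <;> rw [h2] at h3 <;> simp at h3 <;> omega

theorem radius_bomb_spec : Claim_unchanged_radius_bomb := by
  intro radius coordinates _ hlen hD
  unfold radius_bomb radius_bomb_alt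
  match coordinates, hlen, hD with
  | y :: x :: t, _, hD =>
  have hg0 : PySem.List.pyGet? (y :: x :: t) 0 = some y := by
    have h : (0 : Int) ≤ (t.length : Int) + 1 := by positivity
    simp [PySem.List.pyGet?, PySem.List.pyIdx?, h]
  have hg1 : PySem.List.pyGet? (y :: x :: t) 1 = some x := by
    simp [PySem.List.pyGet?, PySem.List.pyIdx?]
  rw [hg0, hg1]
  by_cases hr0 : radius = 0
  · -- radius = 0: outside D_ the list has exactly two entries, and both sides return it
    have ht : t = [] := by
      unfold D_radius_bomb at hD
      push_neg at hD
      have h2 := hD hr0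
      cases t with
      | nil => rfl
      | cons a b => simp at h2
    subst ht
    simp [hr0]
  · simp only [if_neg hr0]
    rcases lt_or_gt_of_ne hr0 with hneg | hpos
    · -- negative radius: every range is empty, both sides return []
      rw [PySem.List.pyRange_one_eq_nil (by omega), PySem.List.pyRange_one_eq_nil (by omega)]
      simp [PySem.Set.ofList, PySem.Set.empty]
    · -- positive radius
      rw [show radius + 1 = (((radius.toNat + 1 : Nat) : Int)) by omega,
        aLoop1_eq y x radius hpos (radius.toNat + 1) (by omega),
        bLoop1_eq y x radius hpos (radius.toNat + 1) (by omega),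
        show ((radius.toNat + 1 : Nat) : Int) = ((radius.toNat : Nat) : Int) + 1 by push_cast; ring,
        aLoop2_eq y x radius hpos (seg1 y x radius (radius.toNat + 1))
          (mem_seg1_zero (by omega) hr0)
          (fun p hp => by
            obtain ⟨i, _, h2⟩ := mem_seg1 hp
            exact ⟨i, h2⟩)
          radius.toNat (by omega),
        bLoop2_eq y x radius hpos _ radius.toNat (by omega)]
      exact (PySem.Set.ofList_eq_self_of_nodup _ (nodup_perimeter y x radius _ _)).symm

theorem radius_bomb_changed : Claim_changed_radius_bomb := by
  unfold Claim_changed_radius_bomb; decide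

theorem radius_bomb_tight : Claim_exact_radius_bomb := by
  intro radius coordinates _ hlen hD
  obtain ⟨hr0, hl2⟩ := hD
  subst hr0
  match coordinates, hlen with
  | y :: x :: z :: t, _ =>
  unfold radius_bomb radius_bomb_alt
  have hg0 : PySem.List.pyGet? (y :: x :: z :: t) 0 = some y := by
    have h : (0 : Int) ≤ (t.length : Int) + 1 + 1 := by positivity
    simp [PySem.List.pyGet?, PySem.List.pyIdx?, h]
  have hg1 : PySem.List.pyGet? (y :: x :: z :: t) 1 = some x := by
    have h : (0 : Int) ≤ (t.length : Int) + 1 := by positivity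
    simp [PySem.List.pyGet?, PySem.List.pyIdx?, h]
  rw [hg0, hg1]
  simp
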